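-- pv_equiv track=rewrite | github.com/aspuru-guzik-group/da_for_polymers | da_for_polymers/data/automated_fragmentation/auto_augment.py | iterative_shuffle
-- ===== SOURCE A (Python) =====
-- import copy
-- from collections import deque
--
-- def iterative_shuffle(fragmented: list[str]) -> list[list[str]]:
--     """Iteratively shuffle the fragments of a polymer molecule.
--
--     Args:
--         polymer: A polymer molecule.
--
--     Returns:
--         A polymer molecule with its monomer units shuffled. (list[list[str]])
--     """
--     augmented_polymer_list = []
--     polymer_frag_deque = deque(copy.copy(fragmented))
--     for j in range(len(fragmented)):
--         frag_rotate = copy.copy(polymer_frag_deque)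
--         frag_rotate.rotate(j)
--         frag_rotate = list(frag_rotate)
--         augmented_polymer_list.append(frag_rotate)
--
--     return augmented_polymer_list
-- ===== SOURCE B (Python) =====
-- def iterative_shuffle(fragmented: list[str]) -> list[list[str]]:
--     """Build all right-rotations via fixed-width windows over a doubled buffer."""
--     n = len(fragmented)
--     doubled = fragmented + fragmented
--     return [doubled[n - j : 2 * n - j] for j in range(n)]
-- ===== Notes on version B (the rewrite author's own statement) =====
-- stated objective: alternative
-- what changed: Replaces the per-iteration deque copy + rotate(j) with a single doubled buffer over which fixed-width slice windows are taken; no deque and no rotation is performed.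
import Mathlib
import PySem

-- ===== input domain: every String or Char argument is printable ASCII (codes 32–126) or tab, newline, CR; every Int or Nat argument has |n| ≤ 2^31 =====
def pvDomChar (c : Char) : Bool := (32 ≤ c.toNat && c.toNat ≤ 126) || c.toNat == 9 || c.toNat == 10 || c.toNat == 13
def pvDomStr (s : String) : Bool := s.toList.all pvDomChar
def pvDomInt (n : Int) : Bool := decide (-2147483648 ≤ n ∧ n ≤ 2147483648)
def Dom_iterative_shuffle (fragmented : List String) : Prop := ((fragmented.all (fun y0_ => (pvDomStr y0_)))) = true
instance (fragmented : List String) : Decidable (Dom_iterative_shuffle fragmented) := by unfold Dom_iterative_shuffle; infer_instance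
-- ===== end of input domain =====

-- B builds the rotations as slice windows of a doubled buffer instead of copying and rotating a deque per iteration (alternative decomposition, same cost).

-- ===== PORT A =====
-- deque.rotate(j): right-rotation by j (Python's collections.deque semantics for 0 ≤ j)
def dequeRotate (xs : List String) (j : Nat) : List String :=
  if xs.length = 0 then xs
  else
    let k := xs.length - j % xs.length
    xs.drop k ++ xs.take k

def iterative_shuffle (fragmented : List String) : List (List String) :=
  (List.range fragmented.length).foldl
    (fun augmented_polymer_list j => augmented_polymer_list ++ [dequeRotate fragmented j]) []

-- ===== PORT B =====
def iterative_shuffle_alt (fragmented : List String) : List (List String) :=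
  let n := fragmented.length
  let doubled := fragmented ++ fragmented
  (List.range n).map (fun j =>
    PySem.List.slice doubled (some ((n - j : Nat) : Int)) (some ((2 * n - j : Nat) : Int)))

-- ===== PRECONDITION & SPEC =====
def Spec_iterative_shuffle (fragmented : List String) (out : List (List String)) : Prop := out = iterative_shuffle_alt fragmented
instance (fragmented : List String) (out : List (List String)) : Decidable (Spec_iterative_shuffle fragmented out) := by unfold Spec_iterative_shuffle; infer_instance

-- ===== CLAIM (what is proved, stated in full; the proofs are below) =====
def Claim_equal_iterative_shuffle : Prop := ∀ (fragmented : List String), Dom_iterative_shuffle fragmented → Spec_iterative_shuffle fragmented (iterative_shuffle fragmented)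

-- ===== LEMMAS AND PROOFS =====
theorem rotate_eq_window (xs : List String) (j : Nat) (hj : j < xs.length) :
    dequeRotate xs j =
      PySem.List.slice (xs ++ xs) (some ((xs.length - j : Nat) : Int))
        (some ((2 * xs.length - j : Nat) : Int)) := by
  rw [PySem.List.slice_natCast]
  have hn : xs.length ≠ 0 := by omega
  have hmod : j % xs.length = j := Nat.mod_eq_of_lt hj
  simp only [dequeRotate, if_neg hn, hmod]
  rw [List.drop_append]
  have h1 : xs.length - j - xs.length = 0 := by omega
  have h2 : 2 * xs.length - j - (xs.length - j) = xs.length := by omega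
  rw [h1, h2, List.drop_zero, List.take_append]
  have h3 : (xs.drop (xs.length - j)).length = j := by
    simp [List.length_drop]; omega
  rw [List.take_of_length_le (by omega : (xs.drop (xs.length - j)).length ≤ xs.length), h3]

-- ===== VERDICT (by name: the statement is the Claim_ definition above) =====
theorem iterative_shuffle_spec : Claim_equal_iterative_shuffle := by
  intro fragmented _
  unfold Spec_iterative_shuffle iterative_shuffle iterative_shuffle_alt
  rw [PySem.List.foldl_append_singleton_eq_map]
  exact List.map_congr_left (fun j hj => rotate_eq_window fragmented j (List.mem_range.mp hj))
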